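-- pv_equiv track=rewrite | github.com/santha22/PythonPrograms | GFG/UniqueNumOccurrences.py | isFrequencyUnique
-- ===== SOURCE A (Python) =====
-- from typing import List
--
-- def isFrequencyUnique(n : int, arr : List[int]) -> bool:
--     # code here
--     frequency = {}
--
--     for i in arr:
--         if i in frequency:
--             frequency[i] += 1
--         else:
--             frequency[i] = 1
--
--     seen_frequency = set()
--     for freq in frequency.values():
--         if freq in seen_frequency:
--             return False
--         seen_frequency.add(freq)
--
--     return True
-- ===== SOURCE B (Python) =====
-- def isFrequencyUnique(n, arr):
--     counts = {}
--     for x in arr: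
--         counts[x] = counts.get(x, 0) + 1
--     vals = sorted(counts.values())
--     return all(a != b for a, b in zip(vals, vals[1:]))
-- ===== Notes on version B (the rewrite author's own statement) =====
-- stated objective: alternative
-- what changed: B detects duplicate frequencies by sorting the count list once and scanning adjacent pairs, instead of A's early-return scan that maintains a seen-set of frequencies.
import Mathlib
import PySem

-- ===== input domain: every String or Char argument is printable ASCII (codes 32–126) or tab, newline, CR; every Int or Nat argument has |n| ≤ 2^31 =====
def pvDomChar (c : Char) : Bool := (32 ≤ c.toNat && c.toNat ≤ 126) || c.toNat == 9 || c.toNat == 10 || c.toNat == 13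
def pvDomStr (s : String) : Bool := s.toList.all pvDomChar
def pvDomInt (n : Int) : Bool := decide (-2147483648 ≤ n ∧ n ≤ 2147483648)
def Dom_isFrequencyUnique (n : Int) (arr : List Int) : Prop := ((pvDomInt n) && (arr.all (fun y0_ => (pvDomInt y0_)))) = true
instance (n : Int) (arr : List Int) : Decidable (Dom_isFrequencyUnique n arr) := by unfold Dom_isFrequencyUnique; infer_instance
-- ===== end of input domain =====

-- B replaces A's early-return scan with a seen-set by a sort of the count list and an adjacent-pair scan (alternative decomposition, same result).

-- ===== PORT A =====
-- 'for freq in frequency.values(): if freq in seen_frequency: return False; seen_frequency.add(freq)'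
def pvSeenLoop (vals : List Int) (seen : PySem.Set Int) : Bool :=
  match vals with
  | [] => true
  | f :: rest =>
      if PySem.Set.contains seen f then false
      else pvSeenLoop rest (PySem.Set.add seen f)

def isFrequencyUnique (n : Int) (arr : List Int) : Bool :=
  let frequency := arr.foldl
    (fun d i => if d.contains i then d.insert i (d.getD i 0 + 1) else d.insert i 1)
    PySem.Dict.empty
  pvSeenLoop frequency.values PySem.Set.empty

-- ===== PORT B =====
def isFrequencyUnique_alt (n : Int) (arr : List Int) : Bool :=
  let counts := arr.foldl (fun d x => d.insert x (d.getD x 0 + 1)) (PySem.Dict.empty : PySem.Dict Int Int)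
  let vals := PySem.List.sorted counts.values (fun v => v) false
  (vals.zip (PySem.List.slice vals (some 1) none)).all (fun p => p.1 != p.2)

-- ===== PRECONDITION & SPEC =====
def Spec_isFrequencyUnique (n : Int) (arr : List Int) (out : Bool) : Prop := out = isFrequencyUnique_alt n arr
instance (n : Int) (arr : List Int) (out : Bool) : Decidable (Spec_isFrequencyUnique n arr out) := by unfold Spec_isFrequencyUnique; infer_instance

-- ===== CLAIM (what is proved, stated in full; the proofs are below) =====
def Claim_equal_isFrequencyUnique : Prop := ∀ (n : Int) (arr : List Int), Dom_isFrequencyUnique n arr → Spec_isFrequencyUnique n arr (isFrequencyUnique n arr)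

-- ===== LEMMAS AND PROOFS =====

-- A's counting loop builds the same dict as B's: the 'contains' branch of A is redundant
theorem pvFoldA_eq_counter (arr : List Int) :
    arr.foldl (fun d i => if d.contains i then d.insert i (d.getD i 0 + 1) else d.insert i 1)
      (PySem.Dict.empty : PySem.Dict Int Int)
    = arr.foldl (fun d x => d.insert x (d.getD x 0 + 1)) PySem.Dict.empty := by
  have hfun : (fun (d : PySem.Dict Int Int) (i : Int) =>
        if d.contains i then d.insert i (d.getD i 0 + 1) else d.insert i 1)
      = (fun (d : PySem.Dict Int Int) (x : Int) => d.insert x (d.getD x 0 + 1)) := by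
    funext d x
    cases h : d.contains x with
    | true => rw [if_pos rfl]
    | false =>
        rw [if_neg Bool.false_ne_true, PySem.Dict.getD_of_not_contains d 0 h, zero_add]
  exact congrArg (fun f => List.foldl f PySem.Dict.empty arr) hfun

-- the seen-set loop returns true iff the remaining values are Nodup and disjoint from seen
theorem pvSeenLoop_iff (vals : List Int) (seen : PySem.Set Int) :
    pvSeenLoop vals seen = true ↔ vals.Nodup ∧ ∀ x ∈ vals, x ∉ seen := by
  induction vals generalizing seen with
  | nil => simp [pvSeenLoop]
  | cons f rest ih =>
      have hstep : pvSeenLoop (f :: rest) seen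
          = if PySem.Set.contains seen f then false
            else pvSeenLoop rest (PySem.Set.add seen f) := rfl
      cases hcc : PySem.Set.contains seen f with
      | true =>
          have h : f ∈ seen := (PySem.Set.contains_iff seen f).1 hcc
          rw [hstep, hcc, if_pos rfl]
          constructor
          · intro hf; exact absurd hf Bool.false_ne_true
          · rintro ⟨-, hall⟩
            exact absurd h (hall f (List.mem_cons_self ..))
      | false =>
          have h : f ∉ seen := fun hm => by
            rw [(PySem.Set.contains_iff seen f).2 hm] at hcc; cases hcc
          rw [hstep, hcc, if_neg Bool.false_ne_true, ih]
          constructor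
          · rintro ⟨hnd, hdisj⟩
            refine ⟨List.nodup_cons.2
              ⟨fun hf => hdisj f hf ((PySem.Set.mem_add _ _ _).2 (Or.inr rfl)), hnd⟩, ?_⟩
            intro x hx
            rcases List.mem_cons.1 hx with rfl | hx'
            · exact h
            · exact fun hxs => hdisj x hx' ((PySem.Set.mem_add _ _ _).2 (Or.inl hxs))
          · rintro ⟨hnd, hdisj⟩
            rcases List.nodup_cons.1 hnd with ⟨hf, hnd'⟩
            refine ⟨hnd', fun x hx hxa => ?_⟩
            rcases (PySem.Set.mem_add _ _ _).1 hxa with hxs | rfl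
            · exact hdisj x (List.mem_cons_of_mem _ hx) hxs
            · exact hf hx

-- adjacent-pair distinctness of a ≤-sorted list is exactly Nodup
theorem pvAdj_iff_nodup (s : List Int) (hs : s.Pairwise (· ≤ ·)) :
    ((s.zip s.tail).all (fun p => p.1 != p.2) = true) ↔ s.Nodup := by
  induction s with
  | nil => simp
  | cons a t ih =>
      cases t with
      | nil => simp
      | cons b u =>
          rcases List.pairwise_cons.1 hs with ⟨hab, ht⟩
          have hble : ∀ x ∈ u, b ≤ x := (List.pairwise_cons.1 ht).1
          simp only [List.tail_cons, List.zip_cons_cons, List.all_cons, Bool.and_eq_true,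
            bne_iff_ne, ne_eq]
          rw [show ((b :: u).zip u) = ((b :: u).zip ((b :: u).tail)) from rfl]
          rw [ih ht]
          constructor
          · rintro ⟨hne, hnd⟩
            refine List.nodup_cons.2 ⟨?_, hnd⟩
            intro hmem
            rcases List.mem_cons.1 hmem with rfl | hmu
            · exact hne rfl
            · have h1 : a < b := lt_of_le_of_ne (hab b (List.mem_cons_self ..)) hne
              have h2 : b ≤ a := hble a hmu
              omega
          · intro hnd
            rcases List.nodup_cons.1 hnd with ⟨hna, hnd'⟩
            exact ⟨fun hab' => hna (hab' ▸ List.mem_cons_self ..), hnd'⟩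

-- both checks decide 'the list of counts has no duplicate': A by a seen-set, B by sorting
theorem pvLoop_eq_adj (l : List Int) :
    pvSeenLoop l PySem.Set.empty
      = ((PySem.List.sorted l (fun v => v) false).zip
          (PySem.List.slice (PySem.List.sorted l (fun v => v) false) (some 1) none)).all
          (fun p => p.1 != p.2) := by
  rw [PySem.List.slice_from_one, Bool.eq_iff_iff, pvSeenLoop_iff,
    pvAdj_iff_nodup _ (PySem.List.sorted_pairwise l (fun v => v)),
    (PySem.List.sorted_perm l (fun v => v) false).nodup_iff]
  simp [PySem.Set.empty]

-- ===== VERDICT (by name: the statement is the Claim_ definition above) =====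
theorem isFrequencyUnique_spec : Claim_equal_isFrequencyUnique := by
  intro n arr _
  simp only [Spec_isFrequencyUnique, isFrequencyUnique, isFrequencyUnique_alt]
  rw [pvFoldA_eq_counter arr]
  exact pvLoop_eq_adj _
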